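-- pv_equiv track=rewrite | github.com/Kanaykinvv/py.checkio.org | 04_Oreilly_08_SortExceptZero.py | except_zero
-- ===== SOURCE A (Python) =====
-- from typing import Iterable
--
-- def except_zero(items: list) -> Iterable:
--     # your code here
--     list_zero = list()
--     list_other = list()
--     result = []
--
--     for index in range(0, len(items)):
--         if items[index] == 0:
--             list_zero.append(index)
--         else:
--             list_other.append(items[index])
--
--     list_other = sorted(list_other)
--
--     a = 0 if len(list_other) > 0 else -1
--
--     for i in range(0, len(items)):
--         if i in list_zero:
--             result.append(0)
--         else:
--             if a > -1:
--                 result.append(list_other[a])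
--                 a += 1
--
--     return result
-- ===== SOURCE B (Python) =====
-- def except_zero(items: list):
--     # Selection-based: no sort call. Keep the multiset of remaining non-zero
--     # values; at each non-zero slot extract its minimum and emit it.
--     remaining = [v for v in items if v != 0]
--     out = []
--     for v in items:
--         if v == 0:
--             out.append(0)
--         else:
--             m = min(remaining)
--             remaining.remove(m)
--             out.append(m)
--     return out
-- ===== Notes on version B (the rewrite author's own statement) =====
-- stated objective: alternative
-- what changed: B drops the sort entirely: it keeps the multiset of remaining non-zero values and, at each non-zero slot, extracts the minimum with min()+remove() (selection in place of A's sorted()+zero-index membership scan with a counter).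
import Mathlib
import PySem

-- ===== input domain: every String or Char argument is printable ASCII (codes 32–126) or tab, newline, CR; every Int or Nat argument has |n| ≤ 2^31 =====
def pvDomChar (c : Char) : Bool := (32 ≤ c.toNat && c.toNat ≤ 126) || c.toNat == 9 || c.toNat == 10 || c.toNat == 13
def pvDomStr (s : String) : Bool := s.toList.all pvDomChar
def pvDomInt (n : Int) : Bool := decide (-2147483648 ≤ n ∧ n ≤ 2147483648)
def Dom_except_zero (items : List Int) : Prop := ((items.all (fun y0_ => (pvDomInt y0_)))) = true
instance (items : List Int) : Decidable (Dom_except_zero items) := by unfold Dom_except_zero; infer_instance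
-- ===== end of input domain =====

-- B replaces A's sorted()+zero-index membership scan by a sort-free selection pass:
-- it extracts the minimum of the remaining non-zero multiset at each non-zero slot
-- (objective: alternative).

-- ===== PORT A =====
-- first loop: for index in range(0, len(items)): split into zero indices / other values
-- (index is always in range, so pyGetD's default is never read)
def exzLoop1 (items : List Int) : List Int → (List Int × List Int) → (List Int × List Int)
  | [], st => st
  | i :: is, (lz, lo) =>
    if PySem.List.pyGetD items i 0 = 0 then exzLoop1 items is (lz ++ [i], lo)
    else exzLoop1 items is (lz, lo ++ [PySem.List.pyGetD items i 0])

-- second loop: for i in range(0, len(items)): membership test in list_zero, counter a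
-- (a stays in range of lo whenever it is read, so pyGetD's default is never read)
def exzLoop2 (lz lo : List Int) : List Int → (List Int × Int) → (List Int × Int)
  | [], st => st
  | i :: is, (res, a) =>
    if i ∈ lz then exzLoop2 lz lo is (res ++ [0], a)
    else if a > -1 then exzLoop2 lz lo is (res ++ [PySem.List.pyGetD lo a 0], a + 1)
    else exzLoop2 lz lo is (res, a)

def except_zero (items : List Int) : List Int :=
  let n : Int := items.length
  let p := exzLoop1 items (PySem.List.pyRange 0 n 1) ([], [])
  let lo := PySem.List.sorted p.2 (fun x => x) false
  let a : Int := if lo.length > 0 then 0 else -1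
  (exzLoop2 p.1 lo (PySem.List.pyRange 0 n 1) ([], a)).1

-- ===== PORT B =====
-- the for-loop over items carrying (remaining, out): at a zero slot emit 0; otherwise
-- m = min(remaining); remaining.remove(m); out.append(m). min()/remove() on an empty
-- 'remaining' would raise in Python but is never reached (one value per non-zero slot);
-- the none arms return the accumulator unchanged.
def ezbLoop : List Int → List Int → List Int
  | [], _ => []
  | v :: rest, rem =>
    if v = 0 then 0 :: ezbLoop rest rem
    else match PySem.List.min? rem (fun x => x) with
      | some m => m :: ezbLoop rest ((PySem.List.remove? rem m).getD rem)
      | none => []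

def except_zero_alt (items : List Int) : List Int :=
  ezbLoop items (items.filter (fun v => v ≠ 0))

-- ===== PRECONDITION & SPEC =====
def Spec_except_zero (items : List Int) (out : List Int) : Prop := out = except_zero_alt items
instance (items : List Int) (out : List Int) : Decidable (Spec_except_zero items out) := by unfold Spec_except_zero; infer_instance

-- ===== CLAIM (what is proved, stated in full; the proofs are below) =====
def Claim_equal_except_zero : Prop := ∀ (items : List Int), Dom_except_zero items → Spec_except_zero items (except_zero items)

-- ===== LEMMAS AND PROOFS =====

-- proof-side bridge: merging items with a ready sorted list of the non-zero values
def exzMerge : List Int → List Int → List Int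
  | [], _ => []
  | v :: rest, vals =>
    if v = 0 then 0 :: exzMerge rest vals
    else match vals with
      | w :: ws => w :: exzMerge rest ws
      | [] => []

lemma exz_loop1_spec (items : List Int) :
    ∀ (d j : Nat) (lz lo : List Int), items.length = j + d →
      exzLoop1 items (PySem.List.pyRange (j : Int) (items.length : Int) 1) (lz, lo) =
        (lz ++ (PySem.List.pyRange (j : Int) (items.length : Int) 1).filter
                  (fun i => decide (PySem.List.pyGetD items i 0 = 0)),
         lo ++ (items.drop j).filter (fun v => decide (v ≠ 0))) := by
  intro d
  induction d with
  | zero =>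
    intro j lz lo hlen
    have hr : PySem.List.pyRange (j : Int) (items.length : Int) 1 = [] :=
      PySem.List.pyRange_one_eq_nil (by omega)
    have hd : items.drop j = [] := List.drop_eq_nil_of_le (by omega)
    rw [hr, hd]
    simp [exzLoop1]
  | succ d ih =>
    intro j lz lo hlen
    have hj : j < items.length := by omega
    have hr : PySem.List.pyRange (j : Int) (items.length : Int) 1 =
        (j : Int) :: PySem.List.pyRange ((j : Int) + 1) (items.length : Int) 1 :=
      PySem.List.pyRange_one_cons (by exact_mod_cast hj)
    have hget : PySem.List.pyGetD items (j : Int) 0 = items[j] := by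
      rw [PySem.List.pyGetD_natCast, List.getD_eq_getElem items 0 hj]
    have hdrop : items.drop j = items[j] :: items.drop (j + 1) :=
      List.drop_eq_getElem_cons hj
    have hcast : (j : Int) + 1 = ((j + 1 : Nat) : Int) := by push_cast; ring
    rw [hr]
    by_cases h0 : items[j] = 0
    · simp only [exzLoop1, hget, h0]
      rw [hcast, ih (j + 1) (lz ++ [(j : Int)]) lo (by omega)]
      simp [hdrop, h0, hget, List.append_assoc]
    · simp only [exzLoop1, hget, if_neg h0]
      rw [hcast, ih (j + 1) lz (lo ++ [items[j]]) (by omega)]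
      simp only [Prod.mk.injEq]
      constructor
      · rw [List.filter_cons]; simp [hget, h0]
      · rw [hdrop, List.filter_cons]; simp [h0, List.append_assoc]

-- membership in the zero-index list A builds, for an in-range natural index
lemma exz_mem_zlist (items : List Int) (j : Nat) (hj : j < items.length) :
    ((j : Int) ∈ (PySem.List.pyRange 0 (items.length : Int) 1).filter
        (fun i => decide (PySem.List.pyGetD items i 0 = 0))) ↔ items[j] = 0 := by
  rw [List.mem_filter, PySem.List.mem_pyRange_one,
      PySem.List.pyGetD_natCast, List.getD_eq_getElem items 0 hj]
  simp
  omega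

lemma exz_loop2_spec (items s lz : List Int)
    (hlz : ∀ (k : Nat) (hk : k < items.length), (((k : Int) ∈ lz) ↔ items[k]'hk = 0)) :
    ∀ (d j a : Nat) (res : List Int), items.length = j + d →
      a + ((items.drop j).filter (fun v => decide (v ≠ 0))).length = s.length →
      (exzLoop2 lz s (PySem.List.pyRange (j : Int) (items.length : Int) 1) (res, (a : Int))).1 =
      res ++ exzMerge (items.drop j) (s.drop a) := by
  intro d
  induction d with
  | zero =>
    intro j a res hlen _
    have hr : PySem.List.pyRange (j : Int) (items.length : Int) 1 = [] :=
      PySem.List.pyRange_one_eq_nil (by omega)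
    have hd : items.drop j = [] := List.drop_eq_nil_of_le (by omega)
    rw [hr, hd]
    simp [exzLoop2, exzMerge]
  | succ d ih =>
    intro j a res hlen hcnt
    have hj : j < items.length := by omega
    have hr : PySem.List.pyRange (j : Int) (items.length : Int) 1 =
        (j : Int) :: PySem.List.pyRange ((j : Int) + 1) (items.length : Int) 1 :=
      PySem.List.pyRange_one_cons (by exact_mod_cast hj)
    have hdrop : items.drop j = items[j] :: items.drop (j + 1) :=
      List.drop_eq_getElem_cons hj
    have hcast : (j : Int) + 1 = ((j + 1 : Nat) : Int) := by push_cast; ring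
    rw [hr]
    by_cases h0 : items[j] = 0
    · have hfc : (items.drop j).filter (fun v => decide (v ≠ 0)) =
          (items.drop (j + 1)).filter (fun v => decide (v ≠ 0)) := by
        rw [hdrop, List.filter_cons]; simp [h0]
      have hmem := (hlz j hj).mpr h0
      simp only [exzLoop2, if_pos hmem]
      rw [hcast, ih (j + 1) a (res ++ [0]) (by omega) (by rw [← hfc]; exact hcnt)]
      rw [hdrop]
      simp [exzMerge, h0]
    · have hfc : (items.drop j).filter (fun v => decide (v ≠ 0)) =
          items[j] :: (items.drop (j + 1)).filter (fun v => decide (v ≠ 0)) := by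
        rw [hdrop, List.filter_cons]; simp [h0]
      rw [hfc, List.length_cons] at hcnt
      have hcnt' : (a + 1) + ((items.drop (j + 1)).filter (fun v => decide (v ≠ 0))).length
          = s.length := by omega
      have ha : a < s.length := by omega
      have hmem : ¬ ((j : Int) ∈ lz) := fun h => h0 ((hlz j hj).mp h)
      have hgt : ((a : Int) > -1) := by omega
      simp only [exzLoop2, if_neg hmem, if_pos hgt]
      have hget : PySem.List.pyGetD s (a : Int) 0 = s[a] := by
        rw [PySem.List.pyGetD_natCast, List.getD_eq_getElem s 0 ha]
      have hsdrop : s.drop a = s[a] :: s.drop (a + 1) :=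
        List.drop_eq_getElem_cons ha
      have hacast : (a : Int) + 1 = ((a + 1 : Nat) : Int) := by push_cast; ring
      rw [hget, hcast, hacast, ih (j + 1) (a + 1) (res ++ [s[a]]) (by omega) hcnt']
      rw [hdrop, hsdrop]
      simp [exzMerge, h0]

-- the all-zero case: list_other is empty, a = -1, every slot appends 0
lemma exz_loop2_neg (items s lz : List Int)
    (hlz : ∀ (k : Nat) (hk : k < items.length), (((k : Int) ∈ lz) ↔ items[k]'hk = 0))
    (hz : ∀ v ∈ items, v = 0) :
    ∀ (d j : Nat) (res : List Int), items.length = j + d →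
      (exzLoop2 lz s (PySem.List.pyRange (j : Int) (items.length : Int) 1) (res, (-1 : Int))).1 =
      res ++ exzMerge (items.drop j) s := by
  intro d
  induction d with
  | zero =>
    intro j res hlen
    have hr : PySem.List.pyRange (j : Int) (items.length : Int) 1 = [] :=
      PySem.List.pyRange_one_eq_nil (by omega)
    have hd : items.drop j = [] := List.drop_eq_nil_of_le (by omega)
    rw [hr, hd]
    simp [exzLoop2, exzMerge]
  | succ d ih =>
    intro j res hlen
    have hj : j < items.length := by omega
    have hr : PySem.List.pyRange (j : Int) (items.length : Int) 1 =
        (j : Int) :: PySem.List.pyRange ((j : Int) + 1) (items.length : Int) 1 :=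
      PySem.List.pyRange_one_cons (by exact_mod_cast hj)
    have hdrop : items.drop j = items[j] :: items.drop (j + 1) :=
      List.drop_eq_getElem_cons hj
    have h0 : items[j] = 0 := hz _ (List.getElem_mem hj)
    have hmem := (hlz j hj).mpr h0
    have hcast : (j : Int) + 1 = ((j + 1 : Nat) : Int) := by push_cast; ring
    rw [hr]
    simp only [exzLoop2, if_pos hmem]
    rw [hcast, ih (j + 1) (res ++ [0]) (by omega)]
    rw [hdrop]
    simp [exzMerge, h0]

-- extracting the minimum takes the head of the sorted list: sorted rem = m :: sorted (rem.erase m)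
lemma exz_sorted_min_cons (rem : List Int) (m : Int)
    (hmin : PySem.List.min? rem (fun x => x) = some m) :
    PySem.List.sorted rem (fun x => x) false =
      m :: PySem.List.sorted (rem.erase m) (fun x => x) false := by
  have hm : m ∈ rem := PySem.List.min?_mem hmin
  have hle : ∀ y ∈ rem, m ≤ y := by
    intro y hy; exact PySem.List.min?_isMin hmin y hy
  refine PySem.List.sorted_id_eq_of_perm_of_pairwise rem
      (m :: PySem.List.sorted (rem.erase m) (fun x => x) false) ?_ ?_
  · exact ((PySem.List.sorted_perm ..).cons _).trans (List.perm_cons_erase hm).symm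
  · refine List.pairwise_cons.mpr ⟨?_, ?_⟩
    · intro y hy
      exact hle y (List.mem_of_mem_erase ((PySem.List.mem_sorted ..).mp hy))
    · exact PySem.List.sorted_pairwise ..

-- the selection loop equals merging with the sorted remaining values
lemma ezb_eq_merge : ∀ (l rem : List Int),
    (l.filter (fun v => decide (v ≠ 0))).length ≤ rem.length →
    ezbLoop l rem = exzMerge l (PySem.List.sorted rem (fun x => x) false) := by
  intro l
  induction l with
  | nil => intro rem _; simp [ezbLoop, exzMerge]
  | cons v rest ih =>
    intro rem hlen
    by_cases h0 : v = 0
    · rw [List.filter_cons] at hlen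
      simp only [h0, decide_not] at hlen
      simp only [ezbLoop, exzMerge, if_pos h0]
      exact congrArg _ (ih rem (by simpa using hlen))
    · rw [List.filter_cons] at hlen
      simp only [h0, decide_not] at hlen
      have hlen' : (rest.filter (fun v => decide (v ≠ 0))).length + 1 ≤ rem.length := by
        simpa using hlen
      have hne : rem ≠ [] := by
        intro h; rw [h] at hlen'; simp at hlen'
      obtain ⟨m, hmin⟩ : ∃ m, PySem.List.min? rem (fun x => x) = some m := by
        cases hm : PySem.List.min? rem (fun x => x) with
        | none => exact absurd ((PySem.List.min?_eq_none_iff rem (fun x => x)).mp hm) hne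
        | some m => exact ⟨m, rfl⟩
      have hm : m ∈ rem := PySem.List.min?_mem hmin
      have hrem : (PySem.List.remove? rem m).getD rem = rem.erase m := by
        rw [PySem.List.remove?_eq_some_erase rem m hm]; rfl
      have hel : (rem.erase m).length = rem.length - 1 := List.length_erase_of_mem hm
      simp only [ezbLoop, if_neg h0, hmin, hrem]
      rw [exz_sorted_min_cons rem m hmin]
      simp only [exzMerge, if_neg h0]
      exact congrArg _ (ih (rem.erase m) (by omega))

-- ===== VERDICT (by name: the statement is the Claim_ definition above) =====
theorem except_zero_spec : Claim_equal_except_zero := by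
  intro items _
  unfold Spec_except_zero except_zero except_zero_alt
  simp only
  have h1 := exz_loop1_spec items items.length 0 [] [] (by simp)
  simp only [Nat.cast_zero, List.drop_zero, List.nil_append] at h1
  rw [h1]
  rw [ezb_eq_merge items (items.filter (fun v => v ≠ 0)) (by simp)]
  have hlen : (PySem.List.sorted (items.filter (fun v => decide (v ≠ 0))) (fun x => x)
        false).length = (items.filter (fun v => decide (v ≠ 0))).length :=
    PySem.List.length_sorted ..
  have hlz := fun (k : Nat) (hk : k < items.length) => exz_mem_zlist items k hk
  by_cases hemp : (PySem.List.sorted (items.filter (fun v => decide (v ≠ 0)))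
      (fun x => x) false).length > 0
  · rw [if_pos (by exact_mod_cast hemp)]
    have h2 := exz_loop2_spec items
      (PySem.List.sorted (items.filter (fun v => decide (v ≠ 0))) (fun x => x) false)
      _ hlz items.length 0 0 [] (by simp)
      (by simp only [List.drop_zero, Nat.zero_add]; omega)
    simpa using h2
  · rw [if_neg (by exact_mod_cast hemp)]
    have hf0 : (items.filter (fun v => decide (v ≠ 0))).length = 0 := by omega
    have hz : ∀ v ∈ items, v = 0 := by
      intro v hv
      by_contra hne
      have hvf : v ∈ items.filter (fun v => decide (v ≠ 0)) := by
        rw [List.mem_filter]; exact ⟨hv, by simpa using hne⟩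
      rw [List.length_eq_zero_iff.mp hf0] at hvf
      exact absurd hvf (List.not_mem_nil)
    have h2 := exz_loop2_neg items
      (PySem.List.sorted (items.filter (fun v => decide (v ≠ 0))) (fun x => x) false)
      _ hlz hz items.length 0 [] (by simp)
    simpa using h2
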